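-- pv_equiv track=rewrite | github.com/fescofesco/CCC | Challenge 2025/Johannes/LEVEL5/level5_solution.py | generate_simple_sequences
-- ===== SOURCE A (Python) =====
-- def generate_simple_sequences(target_x, target_y, time_limit):
--     """Generate simple X and Y pace sequences using Level 3 logic."""
--     def generate_sequence_1d(target, time_limit):
--         if target == 0:
--             return [0]
--
--         direction = 1 if target > 0 else -1
--         distance = abs(target)
--         sequence = [0]
--
--         if distance == 1:
--             sequence.extend([5 * direction, 0])
--         elif distance == 2:
--             sequence.extend([5 * direction, 5 * direction, 0])
--         elif distance >= 9:
--             # Use pace 1 for efficiency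
--             extra_at_1 = distance - 9
--             for pace in range(5, 0, -1):
--                 sequence.append(pace * direction)
--             for _ in range(extra_at_1):
--                 sequence.append(1 * direction)
--             for pace in range(2, 6):
--                 sequence.append(pace * direction)
--             sequence.append(0)
--         else:
--             # Use valley patterns for 3-8
--             patterns = {
--                 3: [5, 4, 5],
--                 4: [5, 4, 4, 5],
--                 5: [5, 4, 3, 4, 5],
--                 6: [5, 4, 3, 3, 4, 5],
--                 7: [5, 4, 3, 2, 3, 4, 5],
--                 8: [5, 4, 3, 2, 2, 3, 4, 5]
--             }
--             sequence.extend([p * direction for p in patterns[distance]])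
--             sequence.append(0)
--
--         return sequence
--
--     x_seq = generate_sequence_1d(target_x, time_limit)
--     y_seq = generate_sequence_1d(target_y, time_limit)
--     return x_seq, y_seq
-- ===== SOURCE B (Python) =====
-- def generate_simple_sequences(target_x, target_y, time_limit):
--     """Generate simple X and Y pace sequences using Level 3 logic."""
--     def generate_sequence_1d(target, time_limit):
--         if target == 0:
--             return [0]
--         s = 1 if target > 0 else -1
--         d = abs(target)
--         if d == 1:
--             core = [5]
--         elif d == 2:
--             core = [5, 5]
--         else:
--             # valley: descend 5..floor+1, stay at floor, ascend back up to 5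
--             floor = max(1, 5 - (d - 1) // 2)
--             count = d - 2 * (5 - floor)
--             core = list(range(5, floor, -1)) + [floor] * count + list(range(floor + 1, 6))
--         return [0] + [p * s for p in core] + [0]
--     return generate_sequence_1d(target_x, time_limit), generate_sequence_1d(target_y, time_limit)
-- ===== Notes on version B (the rewrite author's own statement) =====
-- stated objective: simpler
-- what changed: For distance >= 3 B computes the valley floor and repeat count arithmetically and builds the sequence from two ranges plus a replicated floor, replacing A's hardcoded 3..8 pattern dict and its three separate >= 9 loops with one uniform construction.
import Mathlib
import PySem

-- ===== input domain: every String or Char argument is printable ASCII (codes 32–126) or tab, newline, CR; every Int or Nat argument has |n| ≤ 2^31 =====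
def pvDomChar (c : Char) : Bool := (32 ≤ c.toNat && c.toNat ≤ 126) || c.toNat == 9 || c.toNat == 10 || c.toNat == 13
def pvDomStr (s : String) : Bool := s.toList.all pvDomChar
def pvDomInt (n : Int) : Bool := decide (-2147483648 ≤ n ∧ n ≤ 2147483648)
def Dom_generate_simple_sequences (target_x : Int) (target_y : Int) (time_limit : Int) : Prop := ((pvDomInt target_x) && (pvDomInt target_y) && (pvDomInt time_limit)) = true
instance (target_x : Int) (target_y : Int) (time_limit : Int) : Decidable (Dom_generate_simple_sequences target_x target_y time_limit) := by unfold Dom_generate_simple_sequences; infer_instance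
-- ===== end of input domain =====

-- B replaces A's hardcoded 3..8 pattern dict and three hand-written >=9 loops by one computed
-- valley construction (floor/count formula); objective: simpler, same cost.

-- ===== PORT A =====
-- inner helper generate_sequence_1d of A, transliterated
def pvGenSeq1dA (target : Int) (time_limit : Int) : List Int :=
  if target = 0 then [0]
  else
    let direction : Int := if target > 0 then 1 else -1
    let distance : Int := |target|
    let sequence : List Int := [0]
    if distance = 1 then sequence ++ [5 * direction, 0]
    else if distance = 2 then sequence ++ [5 * direction, 5 * direction, 0]
    else if distance ≥ 9 then
      let extra_at_1 := distance - 9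
      let s1 := (PySem.List.pyRange 5 0 (-1)).foldl (fun acc pace => acc ++ [pace * direction]) sequence
      let s2 := (PySem.List.pyRange 0 extra_at_1 1).foldl (fun acc _ => acc ++ [1 * direction]) s1
      let s3 := (PySem.List.pyRange 2 6 1).foldl (fun acc pace => acc ++ [pace * direction]) s2
      s3 ++ [0]
    else
      -- patterns dict; branch guarantees 3 ≤ distance ≤ 8, so the lookup never misses
      let patterns : PySem.Dict Int (List Int) :=
        PySem.Dict.ofList [(3, [5, 4, 5]), (4, [5, 4, 4, 5]), (5, [5, 4, 3, 4, 5]),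
          (6, [5, 4, 3, 3, 4, 5]), (7, [5, 4, 3, 2, 3, 4, 5]), (8, [5, 4, 3, 2, 2, 3, 4, 5])]
      (sequence ++ (patterns.getD distance []).map (fun p => p * direction)) ++ [0]

def generate_simple_sequences (target_x : Int) (target_y : Int) (time_limit : Int) : List Int × List Int :=
  (pvGenSeq1dA target_x time_limit, pvGenSeq1dA target_y time_limit)

-- ===== PORT B =====
-- inner helper generate_sequence_1d of B, transliterated
def pvGenSeq1dB (target : Int) (time_limit : Int) : List Int :=
  if target = 0 then [0]
  else
    let s : Int := if target > 0 then 1 else -1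
    let d : Int := |target|
    let core : List Int :=
      if d = 1 then [5]
      else if d = 2 then [5, 5]
      else
        let floor := max 1 (5 - PySem.Int.floordiv (d - 1) 2)
        let count := d - 2 * (5 - floor)
        PySem.List.pyRange 5 floor (-1) ++ List.replicate count.toNat floor ++ PySem.List.pyRange (floor + 1) 6 1
    ([0] ++ core.map (fun p => p * s)) ++ [0]

def generate_simple_sequences_alt (target_x : Int) (target_y : Int) (time_limit : Int) : List Int × List Int :=
  (pvGenSeq1dB target_x time_limit, pvGenSeq1dB target_y time_limit)

-- ===== PRECONDITION & SPEC =====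
def Spec_generate_simple_sequences (target_x : Int) (target_y : Int) (time_limit : Int) (out : List Int × List Int) : Prop := out = generate_simple_sequences_alt target_x target_y time_limit
instance (target_x : Int) (target_y : Int) (time_limit : Int) (out : List Int × List Int) : Decidable (Spec_generate_simple_sequences target_x target_y time_limit out) := by unfold Spec_generate_simple_sequences; infer_instance

-- ===== CLAIM (what is proved, stated in full; the proofs are below) =====
def Claim_equal_generate_simple_sequences : Prop := ∀ (target_x : Int) (target_y : Int) (time_limit : Int), Dom_generate_simple_sequences target_x target_y time_limit → Spec_generate_simple_sequences target_x target_y time_limit (generate_simple_sequences target_x target_y time_limit)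

-- ===== LEMMAS AND PROOFS =====

lemma pvGenSeq1d_eq (target time_limit : Int) :
    pvGenSeq1dA target time_limit = pvGenSeq1dB target time_limit := by
  unfold pvGenSeq1dA pvGenSeq1dB
  by_cases h0 : target = 0
  · simp [h0]
  · simp only [h0, if_false]
    set dir : Int := if target > 0 then 1 else -1 with hdir
    set d : Int := |target| with hd
    have hd1 : 1 ≤ d := by
      rw [hd]; rcases lt_or_gt_of_ne h0 with h | h
      · rw [abs_of_neg h]; omega
      · rw [abs_of_pos h]; omega
    by_cases h1 : d = 1
    · simp [h1]
    · by_cases h2 : d = 2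
      · simp [h2]
      · by_cases h9 : d ≥ 9
        · -- large case
          have hfl : PySem.Int.floordiv (d - 1) 2 ≥ 4 := by
            rw [ge_iff_le, PySem.Int.le_floordiv_iff_mul_le (by norm_num)]; omega
          have hfloor : max 1 (5 - PySem.Int.floordiv (d - 1) 2) = 1 := by omega
          simp only [h1, h2, h9, if_true, if_false, hfloor]
          rw [PySem.List.foldl_append_singleton_eq_map, PySem.List.foldl_append_singleton_eq_map,
            PySem.List.foldl_append_singleton_eq_map]
          have hrange5 : PySem.List.pyRange 5 0 (-1) = [5, 4, 3, 2, 1] := by decide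
          have hrange26 : PySem.List.pyRange 2 6 1 = [2, 3, 4, 5] := by decide
          have hrange51 : PySem.List.pyRange 5 1 (-1) = [5, 4, 3, 2] := by decide
          simp only [hrange5, hrange26, hrange51]
          rw [show ((d : Int) - 2 * (5 - 1)).toNat = (d - 9).toNat + 1 from by omega,
            List.replicate_succ]
          simp [hrange26, List.map_replicate, List.map_const', PySem.List.length_pyRange_one]
        · -- 3 ≤ d ≤ 8
          have h3 : 3 ≤ d := by omega
          have h8 : d ≤ 8 := by omega
          simp only [h1, h2, h9, if_false]
          interval_cases d <;> rfl

-- ===== VERDICT (by name: the statement is the Claim_ definition above) =====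
theorem generate_simple_sequences_spec : Claim_equal_generate_simple_sequences := by
  intro tx ty tl _
  unfold Spec_generate_simple_sequences generate_simple_sequences generate_simple_sequences_alt
  rw [pvGenSeq1d_eq, pvGenSeq1d_eq]
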